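-- pv_equiv track=rewrite | github.com/dheeraj009joshi/joshsystem | unileverImageStudy/utils/task_calculation.py | visible_capacity
-- ===== SOURCE A (Python) =====
-- from typing import Dict, List, Tuple, Optional
--
-- def visible_capacity(category_info: Dict[str, List[str]],
--                      min_active: int,
--                      max_active: Optional[int] = None) -> int:
--     """Absence-collapsed count of distinct row patterns with ≥ min_active actives,
--        optionally capped at ≤ max_active actives per row."""
--     cats = list(category_info.keys())
--     m = [len(category_info[c]) for c in cats]
--     C = len(m)
--     coeff = [0]*(C+1); coeff[0] = 1
--     for mi in m:
--         nxt=[0]*(C+1)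
--         for k in range(C+1):
--             if coeff[k]==0: continue
--             nxt[k] += coeff[k]           # ABS choice
--             if k+1<=C: nxt[k+1] += coeff[k]*mi  # choose an element
--         coeff = nxt
--     hi = C if max_active is None else min(max_active, C)
--     lo = max(min_active, 0)
--     if lo > hi:
--         return 0
--     return sum(coeff[k] for k in range(lo, hi+1))
-- ===== SOURCE B (Python) =====
-- from typing import Dict, List, Optional
--
--
-- def _mul(p, q):
--     # coefficient array of the product of two polynomials (nested-loop convolution)
--     n = len(p) + len(q) - 1
--     return [sum(p[i] * q[k - i] for i in range(len(p)) if 0 <= k - i < len(q))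
--             for k in range(n)]
--
--
-- def _prod(sizes):
--     # divide and conquer: product of the polynomials (1 + mi*x) for mi in sizes
--     if len(sizes) == 0:
--         return [1]
--     if len(sizes) == 1:
--         return [1, sizes[0]]
--     mid = len(sizes) // 2
--     return _mul(_prod(sizes[:mid]), _prod(sizes[mid:]))
--
--
-- def visible_capacity(category_info: Dict[str, List[str]],
--                      min_active: int,
--                      max_active: Optional[int] = None) -> int:
--     sizes = [len(v) for v in category_info.values()]
--     C = len(sizes)
--     coeff = _prod(sizes)
--     hi = C if max_active is None else min(max_active, C)
--     lo = max(min_active, 0)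
--     if lo > hi:
--         return 0
--     return sum(coeff[k] for k in range(lo, hi + 1))
-- ===== Notes on version B (the rewrite author's own statement) =====
-- stated objective: alternative
-- what changed: Replaces A's in-place dynamic-programming pass (folding a fixed-size coefficient array over the category sizes with an ABS/choose update) by a divide-and-conquer polynomial product: each size becomes the polynomial 1 + mi*x, halves of the size list are multiplied recursively by an explicit nested-loop convolution, and the same coefficient window [lo..hi] is summed.
import Mathlib
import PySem

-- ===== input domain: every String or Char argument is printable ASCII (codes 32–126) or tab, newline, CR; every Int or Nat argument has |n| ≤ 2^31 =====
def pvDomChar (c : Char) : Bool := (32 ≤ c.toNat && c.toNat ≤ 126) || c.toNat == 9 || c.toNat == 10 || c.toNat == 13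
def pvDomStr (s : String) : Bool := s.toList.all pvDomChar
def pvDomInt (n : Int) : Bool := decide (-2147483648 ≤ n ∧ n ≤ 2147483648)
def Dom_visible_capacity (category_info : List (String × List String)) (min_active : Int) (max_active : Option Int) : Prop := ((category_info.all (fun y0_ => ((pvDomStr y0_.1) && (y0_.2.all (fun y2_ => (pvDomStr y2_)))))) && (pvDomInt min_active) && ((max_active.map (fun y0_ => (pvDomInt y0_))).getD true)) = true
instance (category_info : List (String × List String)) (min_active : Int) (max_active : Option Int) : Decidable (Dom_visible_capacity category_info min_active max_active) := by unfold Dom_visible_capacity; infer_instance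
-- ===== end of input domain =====

-- B replaces A's in-place DP pass over a fixed-size coefficient array by a divide-and-conquer
-- product of the polynomials (1 + mi·x), multiplied by explicit convolution (objective: alternative).

-- ===== PORT A =====
def visible_capacity (category_info : List (String × List String)) (min_active : Int) (max_active : Option Int) : Int :=
  let d := PySem.Dict.ofList category_info
  let cats := d.keys
  let m : List Int := cats.map (fun c => ((d.getD c []).length : Int))
  let C : Nat := m.length
  let coeff0 : List Int := (List.replicate (C+1) (0:Int)).set 0 1
  let coeff := m.foldl (fun coeff mi =>
      (PySem.List.pyRange 0 ((C:Int)+1) 1).foldl (fun nxt k =>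
          if PySem.List.pyGetD coeff k 0 = 0 then nxt
          else
            let nxt' := PySem.List.pySetD nxt k (PySem.List.pyGetD nxt k 0 + PySem.List.pyGetD coeff k 0)
            if k + 1 ≤ (C:Int) then
              PySem.List.pySetD nxt' (k+1) (PySem.List.pyGetD nxt' (k+1) 0 + PySem.List.pyGetD coeff k 0 * mi)
            else nxt')
        (List.replicate (C+1) (0:Int))) coeff0
  let hi : Int := match max_active with | none => (C:Int) | some ma => min ma (C:Int)
  let lo : Int := max min_active 0
  if lo > hi then 0
  else (PySem.List.pyRange lo (hi+1) 1).foldl (fun acc k => acc + PySem.List.pyGetD coeff k 0) 0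

-- ===== PORT B =====
-- _mul: nested-loop convolution of two coefficient arrays
def convPoly (p q : List Int) : List Int :=
  (List.range (p.length + q.length - 1)).map (fun k =>
    (((List.range p.length).filter (fun i => decide (i ≤ k) && decide (k - i < q.length))).map
      (fun i => p.getD i 0 * q.getD (k - i) 0)).sum)

-- _prod: divide-and-conquer product of the polynomials (1 + mi·x)
def prodPoly (sizes : List Int) : List Int :=
  if h0 : sizes.length = 0 then [1]
  else if h1 : sizes.length = 1 then [1, sizes.getD 0 0]
  else
    let mid := sizes.length / 2
    convPoly (prodPoly (sizes.take mid)) (prodPoly (sizes.drop mid))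
termination_by sizes.length
decreasing_by
  · simp only [List.length_take]; omega
  · simp only [List.length_drop]; omega

def visible_capacity_alt (category_info : List (String × List String)) (min_active : Int) (max_active : Option Int) : Int :=
  let d := PySem.Dict.ofList category_info
  let sizes : List Int := d.values.map (fun v => ((v.length) : Int))
  let C : Nat := sizes.length
  let coeff := prodPoly sizes
  let hi : Int := match max_active with | none => (C:Int) | some ma => min ma (C:Int)
  let lo : Int := max min_active 0
  if lo > hi then 0
  else (PySem.List.pyRange lo (hi+1) 1).foldl (fun acc k => acc + PySem.List.pyGetD coeff k 0) 0

-- ===== PRECONDITION & SPEC =====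
def Spec_visible_capacity (category_info : List (String × List String)) (min_active : Int) (max_active : Option Int) (out : Int) : Prop := out = visible_capacity_alt category_info min_active max_active
instance (category_info : List (String × List String)) (min_active : Int) (max_active : Option Int) (out : Int) : Decidable (Spec_visible_capacity category_info min_active max_active out) := by unfold Spec_visible_capacity; infer_instance

-- ===== CLAIM (what is proved, stated in full; the proofs are below) =====
def Claim_equal_visible_capacity : Prop := ∀ (category_info : List (String × List String)) (min_active : Int) (max_active : Option Int), Dom_visible_capacity category_info min_active max_active → Spec_visible_capacity category_info min_active max_active (visible_capacity category_info min_active max_active)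

-- ===== LEMMAS AND PROOFS =====

-- polynomial views used only by the proofs
noncomputable def listPoly (p : List Int) : Polynomial Int :=
  ∑ i ∈ Finset.range p.length, Polynomial.C (p.getD i 0) * Polynomial.X ^ i

noncomputable def sizesPoly (m : List Int) : Polynomial Int :=
  (m.map (fun mi => 1 + Polynomial.C mi * Polynomial.X)).prod

theorem coeff_listPoly (p : List Int) (k : Nat) : (listPoly p).coeff k = p.getD k 0 := by
  rw [listPoly, Polynomial.finset_sum_coeff]
  simp only [Polynomial.coeff_C_mul, Polynomial.coeff_X_pow, mul_ite, mul_one, mul_zero]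
  by_cases h : k < p.length
  · rw [Finset.sum_eq_single k]
    · simp
    · intro b _ hb; simp [Ne.symm hb]
    · intro hk; exact absurd (Finset.mem_range.mpr h) hk
  · rw [List.getD_eq_default _ _ (by omega)]
    apply Finset.sum_eq_zero
    intro i hi
    have : k ≠ i := by have := Finset.mem_range.mp hi; omega
    simp [this]

theorem list_sum_range (f : Nat → Int) (n : Nat) :
    ((List.range n).map f).sum = ∑ i ∈ Finset.range n, f i := by
  induction n with
  | zero => simp
  | succ n ih => simp [List.range_succ, Finset.sum_range_succ, ih]

theorem sum_filter_map {α : Type} (l : List α) (c : α → Bool) (g : α → Int) :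
    ((l.filter c).map g).sum = (l.map (fun i => if c i then g i else 0)).sum := by
  induction l with
  | nil => simp
  | cons a l ih => by_cases h : c a <;> simp [h, ih]

theorem convEntry (p q : List Int) (k : Nat) :
    (((List.range p.length).filter (fun i => decide (i ≤ k) && decide (k - i < q.length))).map
      (fun i => p.getD i 0 * q.getD (k - i) 0)).sum
    = ∑ i ∈ Finset.range (k+1), p.getD i 0 * q.getD (k-i) 0 := by
  rw [sum_filter_map, list_sum_range]
  have step1 : ∀ i ∈ Finset.range p.length,
      (if ((decide (i ≤ k) && decide (k - i < q.length)) : Bool) then p.getD i 0 * q.getD (k-i) 0 else 0)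
      = (if i ≤ k then p.getD i 0 * q.getD (k-i) 0 else 0) := by
    intro i _
    by_cases h1 : i ≤ k
    · by_cases h2 : k - i < q.length
      · simp [h1, h2]
      · have hq : q.length ≤ k - i := by omega
        rw [List.getD_eq_default q 0 hq, mul_zero]
        simp [h1, h2]
    · simp [h1]
  rw [Finset.sum_congr rfl step1]
  have hsub1 : Finset.range p.length ⊆ Finset.range (max p.length (k+1)) := by
    intro x hx; simp only [Finset.mem_range] at *; omega
  have hsub2 : Finset.range (k+1) ⊆ Finset.range (max p.length (k+1)) := by
    intro x hx; simp only [Finset.mem_range] at *; omega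
  rw [Finset.sum_subset hsub1 (by
    intro i _ hi
    have hp : p.length ≤ i := by have := Finset.mem_range.not.mp hi; omega
    rw [List.getD_eq_default p 0 hp, zero_mul]
    split <;> rfl)]
  have : ∑ i ∈ Finset.range (k+1), p.getD i 0 * q.getD (k-i) 0
      = ∑ i ∈ Finset.range (k+1), (if i ≤ k then p.getD i 0 * q.getD (k-i) 0 else 0) := by
    apply Finset.sum_congr rfl
    intro i hi
    have : i ≤ k := by have := Finset.mem_range.mp hi; omega
    simp [this]
  rw [this, Finset.sum_subset hsub2 (by
    intro i _ hi
    have hk : k + 1 ≤ i := by have := Finset.mem_range.not.mp hi; omega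
    rw [if_neg (by omega)])]

theorem getD_map_range (f : Nat → Int) (n k : Nat) :
    (((List.range n).map f).getD k 0) = if k < n then f k else 0 := by
  by_cases h : k < n
  · rw [List.getD_eq_getElem _ _ (by simpa using h)]; simp [h]
  · rw [List.getD_eq_default _ _ (by simpa using h)]; simp [h]

theorem listPoly_convPoly (p q : List Int) : listPoly (convPoly p q) = listPoly p * listPoly q := by
  apply Polynomial.ext
  intro k
  rw [coeff_listPoly, Polynomial.coeff_mul, Finset.Nat.sum_antidiagonal_eq_sum_range_succ_mk]
  simp only [coeff_listPoly]
  rw [convPoly, getD_map_range]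
  by_cases h : k < p.length + q.length - 1
  · rw [if_pos h, convEntry]
  · rw [if_neg h]
    symm
    apply Finset.sum_eq_zero
    intro i hi
    have hi' : i ≤ k := by have := Finset.mem_range.mp hi; omega
    by_cases hp : i < p.length
    · have hq : q.length ≤ k - i := by omega
      rw [List.getD_eq_default q 0 hq, mul_zero]
    · have hp' : p.length ≤ i := by omega
      rw [List.getD_eq_default p 0 hp', zero_mul]

theorem listPoly_prodPoly (l : List Int) : listPoly (prodPoly l) = sizesPoly l := by
  induction l using prodPoly.induct with
  | case1 l h0 =>
    have : l = [] := List.length_eq_zero_iff.mp h0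
    subst this
    rw [prodPoly]
    simp [listPoly, sizesPoly]
  | case2 l h0 h1 =>
    obtain ⟨a, ha⟩ : ∃ a, l = [a] := by
      cases l with
      | nil => simp at h1
      | cons a t => cases t with
        | nil => exact ⟨a, rfl⟩
        | cons b t' => simp at h1
    subst ha
    rw [prodPoly]
    simp [listPoly, sizesPoly, Finset.sum_range_succ]
  | case3 l h0 h1 mid ih1 ih2 =>
    rw [prodPoly]
    simp only [h0, h1, dite_false]
    rw [listPoly_convPoly, ih1, ih2]
    rw [sizesPoly, sizesPoly, sizesPoly, ← List.prod_append, ← List.map_append,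
        List.take_append_drop]

def innerBody (C : Nat) (coeff : List Int) (mi : Int) (nxt : List Int) (k : Int) : List Int :=
  if PySem.List.pyGetD coeff k 0 = 0 then nxt
  else
    let nxt' := PySem.List.pySetD nxt k (PySem.List.pyGetD nxt k 0 + PySem.List.pyGetD coeff k 0)
    if k + 1 ≤ (C:Int) then
      PySem.List.pySetD nxt' (k+1) (PySem.List.pyGetD nxt' (k+1) 0 + PySem.List.pyGetD coeff k 0 * mi)
    else nxt'

theorem getD_set_int (xs : List Int) (n : Nat) (v : Int) (k : Nat) :
    (xs.set n v).getD k 0 = if k = n ∧ n < xs.length then v else xs.getD k 0 := by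
  simp only [List.getD_eq_getElem?_getD, List.getElem?_set]
  by_cases h1 : n = k
  · subst h1
    by_cases h2 : n < xs.length <;> simp [h2]
  · have h1' : ¬ (k = n) := fun h => h1 h.symm
    simp [h1, h1']

theorem inner_partial (C : Nat) (coeff : List Int) (mi : Int) (j : Nat) (hj : j ≤ C+1) :
    (((List.range j).foldl (fun (nxt : List Int) (k : Nat) => innerBody C coeff mi nxt (k:Int)) (List.replicate (C+1) (0:Int))).length = C+1) ∧
    (∀ k, k ≤ C → ((List.range j).foldl (fun (nxt : List Int) (k : Nat) => innerBody C coeff mi nxt (k:Int)) (List.replicate (C+1) (0:Int))).getD k 0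
      = (if k < j then coeff.getD k 0 else 0) + (if 1 ≤ k ∧ k ≤ j then mi * coeff.getD (k-1) 0 else 0)) := by
  induction j with
  | zero =>
    constructor
    · simp
    · intro k hk
      simp [hk]
      omega
  | succ j ih =>
    obtain ⟨ihlen, ihget⟩ := ih (by omega)
    have hjC : j ≤ C := by omega
    rw [List.range_succ, List.foldl_append]
    set r := (List.range j).foldl (fun (nxt : List Int) (k : Nat) => innerBody C coeff mi nxt (k:Int)) (List.replicate (C+1) (0:Int)) with hr
    simp only [List.foldl_cons, List.foldl_nil]
    rw [innerBody]
    simp only [PySem.List.pyGetD_natCast]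
    have hc1 : ((j:Int) + 1) = (((j+1 : Nat)) : Int) := by push_cast; ring
    by_cases c0 : coeff.getD j 0 = 0
    · rw [if_pos c0]
      refine ⟨ihlen, ?_⟩
      intro k hk
      rw [ihget k hk]
      split_ifs <;>
        first
          | rfl
          | omega
          | (have e : k - 1 = j := by omega
             rw [e, c0]; try ring1)
          | (rw [show k = j from by omega, c0]; try ring1)
    · rw [if_neg c0]
      rw [hc1]
      simp only [PySem.List.pySetD_natCast, PySem.List.pyGetD_natCast, Nat.cast_le]
      by_cases hC : j + 1 ≤ C
      · rw [if_pos hC]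
        refine ⟨by simp [ihlen], ?_⟩
        intro k hk
        simp only [getD_set_int, List.length_set, ihlen]
        simp only [ihget k hk, ihget j hjC, ihget (j+1) hC, Nat.add_sub_cancel]
        split_ifs <;>
          first
            | rfl
            | omega
            | ring1
            | (have e : k = j + 1 := by omega
               subst e; simp only [Nat.add_sub_cancel]; try ring1)
            | (have e : k = j := by omega
               subst e; try ring1)
      · rw [if_neg hC]
        refine ⟨by simp [ihlen], ?_⟩
        intro k hk
        simp only [getD_set_int, ihlen]
        simp only [ihget k hk, ihget j hjC]
        split_ifs <;>
          first
            | rfl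
            | omega
            | ring1
            | (have e : k = j := by omega
               subst e; try ring1)

def outerStep (C : Nat) (coeff : List Int) (mi : Int) : List Int :=
  (PySem.List.pyRange 0 ((C:Int)+1) 1).foldl (fun nxt k => innerBody C coeff mi nxt k) (List.replicate (C+1) (0:Int))

theorem outerStep_spec (C : Nat) (coeff : List Int) (mi : Int) :
    (outerStep C coeff mi).length = C+1 ∧
    (∀ k, k ≤ C → (outerStep C coeff mi).getD k 0
      = coeff.getD k 0 + (if k = 0 then 0 else mi * coeff.getD (k-1) 0)) := by
  have hcast : ((C:Int)+1) = (((C+1 : Nat)) : Int) := by push_cast; ring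
  have heq : outerStep C coeff mi
      = (List.range (C+1)).foldl (fun (nxt : List Int) (k : Nat) => innerBody C coeff mi nxt (k:Int)) (List.replicate (C+1) (0:Int)) := by
    rw [outerStep, hcast, PySem.List.pyRange_zero_natCast, List.foldl_map]
  obtain ⟨hlen, hget⟩ := inner_partial C coeff mi (C+1) (le_refl _)
  rw [heq]
  refine ⟨hlen, ?_⟩
  intro k hk
  rw [hget k hk]
  by_cases h0 : k = 0
  · subst h0; simp
  · simp [(by omega : k < C + 1), (by omega : 1 ≤ k ∧ k ≤ C + 1), h0]

theorem coeff_mul_linear (P : Polynomial Int) (a : Int) (k : Nat) :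
    (P * (1 + Polynomial.C a * Polynomial.X)).coeff k
      = P.coeff k + (if k = 0 then 0 else a * P.coeff (k-1)) := by
  rw [mul_add, mul_one, Polynomial.coeff_add]
  rw [show P * (Polynomial.C a * Polynomial.X) = (Polynomial.C a * P) * Polynomial.X by ring]
  cases k with
  | zero => simp
  | succ n => rw [Polynomial.coeff_mul_X, Polynomial.coeff_C_mul]; simp

theorem sizesPoly_append_singleton (pre : List Int) (mi : Int) :
    sizesPoly (pre ++ [mi]) = sizesPoly pre * (1 + Polynomial.C mi * Polynomial.X) := by
  simp [sizesPoly]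

theorem outer_fold (C : Nat) (rest : List Int) : ∀ (pre coeff : List Int),
    coeff.length = C+1 → (∀ k, k ≤ C → coeff.getD k 0 = (sizesPoly pre).coeff k) →
    ((rest.foldl (fun coeff mi => outerStep C coeff mi) coeff).length = C+1 ∧
     ∀ k, k ≤ C → (rest.foldl (fun coeff mi => outerStep C coeff mi) coeff).getD k 0
        = (sizesPoly (pre ++ rest)).coeff k) := by
  induction rest with
  | nil => intro pre coeff h1 h2; simpa using ⟨h1, h2⟩
  | cons mi rest ih =>
    intro pre coeff h1 h2
    simp only [List.foldl_cons]
    have hnext : ∀ k, k ≤ C → (outerStep C coeff mi).getD k 0 = (sizesPoly (pre ++ [mi])).coeff k := by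
      intro k hk
      rw [(outerStep_spec C coeff mi).2 k hk, sizesPoly_append_singleton, coeff_mul_linear]
      rw [h2 k hk]
      by_cases h0 : k = 0
      · simp [h0]
      · rw [h2 (k-1) (by omega)]
    have := ih (pre ++ [mi]) (outerStep C coeff mi) (outerStep_spec C coeff mi).1 hnext
    simpa using this

def aCore (m : List Int) : List Int :=
  m.foldl (fun coeff mi => outerStep m.length coeff mi) ((List.replicate (m.length+1) (0:Int)).set 0 1)

theorem aCore_spec (m : List Int) (k : Nat) (hk : k ≤ m.length) :
    (aCore m).getD k 0 = (sizesPoly m).coeff k := by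
  have hinit : ∀ k, k ≤ m.length → ((List.replicate (m.length+1) (0:Int)).set 0 1).getD k 0 = (sizesPoly []).coeff k := by
    intro k hk
    rw [getD_set_int]
    simp only [List.length_replicate]
    by_cases h0 : k = 0
    · subst h0; simp [sizesPoly]
    · simp [h0, (by omega : k < m.length + 1), sizesPoly, Polynomial.coeff_one]
  have := outer_fold m.length m [] ((List.replicate (m.length+1) (0:Int)).set 0 1)
    (by simp) hinit
  exact (this.2 k hk)

def tailSum (coeff : List Int) (C : Nat) (min_active : Int) (max_active : Option Int) : Int :=
  let hi : Int := match max_active with | none => (C:Int) | some ma => min ma (C:Int)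
  let lo : Int := max min_active 0
  if lo > hi then 0
  else (PySem.List.pyRange lo (hi+1) 1).foldl (fun acc k => acc + PySem.List.pyGetD coeff k 0) 0

theorem portA_eq (ci : List (String × List String)) (mn : Int) (mx : Option Int) :
    visible_capacity ci mn mx =
      tailSum (aCore ((PySem.Dict.ofList ci).keys.map (fun c => (((PySem.Dict.ofList ci).getD c []).length : Int))))
        (((PySem.Dict.ofList ci).keys.map (fun c => (((PySem.Dict.ofList ci).getD c []).length : Int))).length) mn mx := rfl

theorem portB_eq (ci : List (String × List String)) (mn : Int) (mx : Option Int) :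
    visible_capacity_alt ci mn mx =
      tailSum (prodPoly ((PySem.Dict.ofList ci).values.map (fun v => ((v.length) : Int))))
        (((PySem.Dict.ofList ci).values.map (fun v => ((v.length) : Int))).length) mn mx := rfl

theorem sizes_eq (ci : List (String × List String)) :
    (PySem.Dict.ofList ci).keys.map (fun c => (((PySem.Dict.ofList ci).getD c []).length : Int))
      = (PySem.Dict.ofList ci).values.map (fun v => ((v.length) : Int)) := by
  rw [PySem.Dict.values_eq_map_keys (PySem.Dict.ofList ci) (PySem.Dict.nodup_keys_ofList ci) []]
  rw [List.map_map]
  rfl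

theorem tailSum_congr (a b : List Int) (C : Nat) (mn : Int) (mx : Option Int)
    (h : ∀ k : Nat, k ≤ C → a.getD k 0 = b.getD k 0) :
    tailSum a C mn mx = tailSum b C mn mx := by
  simp only [tailSum]
  by_cases hlh : (max mn 0) > (match mx with | none => (C:Int) | some ma => min ma (C:Int))
  · simp only [if_pos hlh]
  · simp only [if_neg hlh]
    apply PySem.List.foldl_congr_mem
    intro acc k hk
    rw [PySem.List.mem_pyRange_one] at hk
    have h0 : (0:Int) ≤ k := le_trans (le_max_right _ _) hk.1
    have hkC : k ≤ (C:Int) := by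
      rcases mx with _ | ma <;> simp at hk <;> omega
    rw [PySem.List.pyGetD_of_nonneg (h := h0), PySem.List.pyGetD_of_nonneg (h := h0)]
    rw [h k.toNat (by omega)]

theorem main_equiv (ci : List (String × List String)) (mn : Int) (mx : Option Int) :
    visible_capacity ci mn mx = visible_capacity_alt ci mn mx := by
  rw [portA_eq, portB_eq, sizes_eq]
  apply tailSum_congr
  intro k hk
  rw [aCore_spec _ _ hk, ← coeff_listPoly, listPoly_prodPoly]


-- ===== VERDICT (by name: the statement is the Claim_ definition above) =====
theorem visible_capacity_spec : Claim_equal_visible_capacity := by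
  intro category_info min_active max_active _
  unfold Spec_visible_capacity
  exact main_equiv category_info min_active max_active
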